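-- pv_equiv track=rewrite | github.com/danmoser/pyhdust | pyhdust/poltools.py | readTests
-- ===== SOURCE A (Python) =====
-- dictags = {0: ['bad modulation','bad-mod'],
--            1: ['very bad modulation','very-bad-mod'],
--            2: ['the pol values have values incompatible from each other','incomp-mods'],
--            3: ['some observational problem/error','obs-prob'],
--            4: ['polarimeter problem suspected','iagpol-prob'],
--            5: ['another relevant problem','other-prob'],
--           }
--
-- dictests = {0: ['std incompatible with the published','obs!=pub', 'W'],
--             1: ['sig >> theorical_sig','s>>theor_s', 'OK'],
--             2: ['no standard in the night','no-std', 'W'],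
--             3: ['standard from another day','oth-day-std', 'W'],
--             4: ['delta theta estimated from another filter','oth-dth', 'W'],
--            }
--
-- def readTests(tests, tags=None, flag=None):
--     """
--     Read boolean list 'tests' concerning to dictests
--     dictionary and return a string list with tags and
--     the flag value ('OK','E','W')
--
--     'tags' and 'flag' are optional and are concerning to
--     another tags already assigned and the current flag. The flag
--     returned is the worst flag found between them
--     (e.g., if input 'flag' is 'W' and tests results on flag
--     'OK', return flag 'W'; if tests results in flag 'E',
--     return 'E'). Also, if they are given as input, return
--     'tags'+tags concerning to 'tests' list.
--     """
--
--     tagstr = ''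
--
--     # Generate a string for such tests tags
--     for i in dictests.keys():
--         if tests[i]:
--             if tagstr != '':
--                 tagstr += ','
--             tagstr += dictests[i][1]
--
--     # Generate a string for such tags
--     if tags != None:
--         for i in dictags.keys():
--             if tags[i]:
--                 if tagstr != '':
--                     tagstr += ','
--                 tagstr += dictags[i][1]
--
--     if flag == None:
--         flag = 'OK'
--
--     # Get the worst case for the flag
--     if 'E' in [dictests[j][2] for j in range(len(tests)) if tests[j]]+[flag]:
--         flag2 = 'E'
--     elif 'W' in [dictests[j][2] for j in range(len(tests)) if tests[j]]+[flag]: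
--         flag2 = 'W'
--     else:
--         flag2 = 'OK'
--
--     if tagstr == '':
--         tagstr = '---'
--
--     return tagstr, flag2
-- ===== SOURCE B (Python) =====
-- TEST_TAGS = ['obs!=pub', 's>>theor_s', 'no-std', 'oth-day-std', 'oth-dth']
-- TEST_FLAGS = ['W', 'OK', 'W', 'W', 'W']
-- TAG_TAGS = ['bad-mod', 'very-bad-mod', 'incomp-mods', 'obs-prob', 'iagpol-prob', 'other-prob']
-- RANK = {'OK': 0, 'W': 1, 'E': 2}
-- LEVELS = ['OK', 'W', 'E']
--
-- def readTests(tests, tags=None, flag=None):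
--     parts = [TEST_TAGS[i] for i in range(5) if tests[i]]
--     if tags is not None:
--         parts += [TAG_TAGS[i] for i in range(6) if tags[i]]
--     worst = RANK.get(flag if flag is not None else 'OK', 0)
--     for j in range(len(tests)):
--         if tests[j]:
--             worst = max(worst, RANK[TEST_FLAGS[j]])
--     return (','.join(parts) or '---', LEVELS[worst])
-- ===== Notes on version B (the rewrite author's own statement) =====
-- stated objective: idiomatic
-- what changed: A accumulates the tag string with manual comma bookkeeping and finds the flag by building a list of severities and scanning it twice for 'E' and 'W'; B builds the selected tags by list comprehensions joined with ','.join and computes the flag in a single pass as a running severity maximum mapped back through a rank table.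
import Mathlib
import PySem

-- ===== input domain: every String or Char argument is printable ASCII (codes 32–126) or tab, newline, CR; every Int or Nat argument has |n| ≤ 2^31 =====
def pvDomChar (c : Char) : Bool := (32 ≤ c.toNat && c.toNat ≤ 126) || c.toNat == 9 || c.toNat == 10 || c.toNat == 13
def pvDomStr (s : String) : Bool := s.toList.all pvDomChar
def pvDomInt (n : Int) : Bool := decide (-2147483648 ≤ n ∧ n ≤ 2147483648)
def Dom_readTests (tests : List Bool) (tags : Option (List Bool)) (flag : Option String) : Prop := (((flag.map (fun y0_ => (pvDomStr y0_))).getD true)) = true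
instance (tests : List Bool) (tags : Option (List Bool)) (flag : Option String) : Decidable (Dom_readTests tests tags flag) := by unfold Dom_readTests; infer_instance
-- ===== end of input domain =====

-- B replaces A's string accumulation with comma bookkeeping and its build-a-list-then-scan-twice
-- flag search by a ','.join over filtered tag tables and a single running severity maximum.

-- ===== PORT A =====
-- module constants: dict values are the Python lists (description, tag[, flag])
def dictags : PySem.Dict Int (List String) := PySem.Dict.ofList
  [(0, ["bad modulation","bad-mod"]),
   (1, ["very bad modulation","very-bad-mod"]),
   (2, ["the pol values have values incompatible from each other","incomp-mods"]),
   (3, ["some observational problem/error","obs-prob"]),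
   (4, ["polarimeter problem suspected","iagpol-prob"]),
   (5, ["another relevant problem","other-prob"])]

def dictests : PySem.Dict Int (List String) := PySem.Dict.ofList
  [(0, ["std incompatible with the published","obs!=pub","W"]),
   (1, ["sig >> theorical_sig","s>>theor_s","OK"]),
   (2, ["no standard in the night","no-std","W"]),
   (3, ["standard from another day","oth-day-std","W"]),
   (4, ["delta theta estimated from another filter","oth-dth","W"])]

-- the defaults fed to pyGetD/getD are unreachable on Pre_ (index in range, key present):
-- Python raises IndexError/KeyError exactly there, and Pre_ excludes those inputs.
def readTests (tests : List Bool) (tags : Option (List Bool)) (flag : Option String) : String × String :=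
  let tagstr : String :=
    dictests.keys.foldl (fun tagstr i =>
      if PySem.List.pyGetD tests i false then
        (if tagstr ≠ "" then tagstr ++ "," else tagstr) ++ PySem.List.pyGetD (dictests.getD i []) 1 ""
      else tagstr) ""
  let tagstr : String :=
    match tags with
    | some tg =>
        dictags.keys.foldl (fun tagstr i =>
          if PySem.List.pyGetD tg i false then
            (if tagstr ≠ "" then tagstr ++ "," else tagstr) ++ PySem.List.pyGetD (dictags.getD i []) 1 ""
          else tagstr) tagstr
    | none => tagstr
  let flag1 : String := match flag with | some f => f | none => "OK"
  let lst : List String :=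
    ((PySem.List.pyRange 0 (tests.length : Int)).filter (fun j => PySem.List.pyGetD tests j false)).map
      (fun j => PySem.List.pyGetD (dictests.getD j []) 2 "")
  let flag2 : String :=
    if (lst ++ [flag1]).contains "E" then "E"
    else if (lst ++ [flag1]).contains "W" then "W"
    else "OK"
  (if tagstr = "" then "---" else tagstr, flag2)

-- ===== PORT B =====
def pvTestTags : List String := ["obs!=pub","s>>theor_s","no-std","oth-day-std","oth-dth"]
def pvTestFlags : List String := ["W","OK","W","W","W"]
def pvTagTags : List String := ["bad-mod","very-bad-mod","incomp-mods","obs-prob","iagpol-prob","other-prob"]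
def pvRank : PySem.Dict String Int := PySem.Dict.ofList [("OK",0),("W",1),("E",2)]
def pvLevels : List String := ["OK","W","E"]

-- pyGetD defaults are unreachable on Pre_ (B raises IndexError exactly where A raises).
def readTests_alt (tests : List Bool) (tags : Option (List Bool)) (flag : Option String) : String × String :=
  let parts : List String :=
    ((PySem.List.pyRange 0 5).filter (fun i => PySem.List.pyGetD tests i false)).map
      (fun i => PySem.List.pyGetD pvTestTags i "")
  let parts : List String := parts ++
    (match tags with
     | some tg =>
        ((PySem.List.pyRange 0 6).filter (fun i => PySem.List.pyGetD tg i false)).map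
          (fun i => PySem.List.pyGetD pvTagTags i "")
     | none => [])
  let worst : Int :=
    (PySem.List.pyRange 0 (tests.length : Int)).foldl (fun w j =>
      if PySem.List.pyGetD tests j false then
        max w (pvRank.getD (PySem.List.pyGetD pvTestFlags j "OK") 0)
      else w)
      (pvRank.getD (match flag with | some f => f | none => "OK") 0)
  let tagstr : String := PySem.Str.join "," parts
  (if tagstr = "" then "---" else tagstr, PySem.List.pyGetD pvLevels worst "")

-- ===== PRECONDITION & SPEC =====
-- Pre_ excludes exactly the inputs where Python A raises: tests shorter than 5 (IndexError),
-- a true entry of tests at an index ≥ 5 (KeyError on dictests), and tags given but shorter than 6 (IndexError).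
def Pre_readTests (tests : List Bool) (tags : Option (List Bool)) (flag : Option String) : Prop :=
  5 ≤ tests.length ∧ (tests.drop 5).all (fun b => b == false) = true ∧
  ((tags.map (fun t => decide (6 ≤ t.length))).getD true) = true
instance (tests : List Bool) (tags : Option (List Bool)) (flag : Option String) : Decidable (Pre_readTests tests tags flag) := by unfold Pre_readTests; infer_instance

def pvWitness_readTests : List Bool × Option (List Bool) × Option String :=
  ([true, false, true, false, false], some [false, true, false, false, false, true], some "W")

def Spec_readTests (tests : List Bool) (tags : Option (List Bool)) (flag : Option String) (out : String × String) : Prop := out = readTests_alt tests tags flag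
instance (tests : List Bool) (tags : Option (List Bool)) (flag : Option String) (out : String × String) : Decidable (Spec_readTests tests tags flag out) := by unfold Spec_readTests; infer_instance

-- ===== CLAIM (what is proved, stated in full; the proofs are below) =====
def Claim_equal_readTests : Prop := ∀ (tests : List Bool) (tags : Option (List Bool)) (flag : Option String), Dom_readTests tests tags flag → Pre_readTests tests tags flag → Spec_readTests tests tags flag (readTests tests tags flag)

-- ===== LEMMAS AND PROOFS =====

-- 'join with a comma unless one side is empty': the value A's comma bookkeeping maintains
def pvGlue (s t : String) : String := if t = "" then s else if s = "" then t else s ++ "," ++ t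

theorem pvGlue_empty_left (t : String) : pvGlue "" t = t := by
  unfold pvGlue; split <;> simp_all

theorem pvJoin_nil : PySem.Str.join "," ([] : List String) = "" := by
  apply String.toList_inj.mp
  simp [PySem.Str.toList_join, PySem.Chars.join_nil]

theorem pvJoin_singleton (t : String) : PySem.Str.join "," [t] = t := by
  apply String.toList_inj.mp
  simp [PySem.Str.toList_join, PySem.Chars.join_singleton]

theorem pvJoin_ne_empty (p : String) (ps : List String) (hp : p ≠ "") :
    PySem.Str.join "," (p :: ps) ≠ "" := by
  intro h
  apply hp
  apply String.toList_inj.mp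
  have h' := congrArg String.toList h
  cases ps with
  | nil => simpa [PySem.Str.toList_join, PySem.Chars.join_singleton] using h'
  | cons q qs =>
    rw [PySem.Str.toList_join] at h'
    simp only [List.map_cons, PySem.Chars.join_cons_cons] at h'
    simp only [String.toList_empty, List.append_assoc, List.append_eq_nil_iff] at h'
    simp [h'.1]

theorem pvJoin_cons (t : String) (ps : List String) (ht : t ≠ "") (hps : ∀ p ∈ ps, p ≠ "") :
    PySem.Str.join "," (t :: ps) = pvGlue t (PySem.Str.join "," ps) := by
  cases ps with
  | nil => simp [pvGlue, pvJoin_nil, pvJoin_singleton]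
  | cons q qs =>
    have hq : PySem.Str.join "," (q :: qs) ≠ "" := pvJoin_ne_empty q qs (hps q (by simp))
    apply String.toList_inj.mp
    rw [PySem.Str.toList_join]
    simp only [List.map_cons, PySem.Chars.join_cons_cons]
    unfold pvGlue
    rw [if_neg hq, if_neg ht]
    simp [PySem.Str.toList_join]

theorem pvGlue_assoc (s t u : String) : pvGlue (pvGlue s t) u = pvGlue s (pvGlue t u) := by
  unfold pvGlue
  by_cases hs : s = "" <;> by_cases ht : t = "" <;> by_cases hu : u = "" <;>
    simp [hs, ht, hu, String.append_eq_empty_iff, String.append_assoc]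

theorem pvJoin_append (xs ys : List String) (hxs : ∀ p ∈ xs, p ≠ "") (hys : ∀ p ∈ ys, p ≠ "") :
    PySem.Str.join "," (xs ++ ys) = pvGlue (PySem.Str.join "," xs) (PySem.Str.join "," ys) := by
  induction xs with
  | nil => simp [pvJoin_nil, pvGlue_empty_left]
  | cons x xs ih =>
    have hx : x ≠ "" := hxs x (by simp)
    have hxs' : ∀ p ∈ xs, p ≠ "" := fun p hp => hxs p (by simp [hp])
    have hall : ∀ p ∈ xs ++ ys, p ≠ "" := by
      intro p hp; rcases List.mem_append.mp hp with h | h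
      · exact hxs' p h
      · exact hys p h
    rw [List.cons_append, pvJoin_cons x (xs ++ ys) hx hall, ih hxs',
        pvJoin_cons x xs hx hxs', pvGlue_assoc]

-- A's conditional comma-fold computes pvGlue of the join of the selected tags
theorem pvCommaFold (cond : Int → Bool) (tagf : Int → String) (keys : List Int)
    (h : ∀ i ∈ keys, tagf i ≠ "") : ∀ s : String,
    keys.foldl (fun t i =>
      if cond i then (if t ≠ "" then t ++ "," else t) ++ tagf i else t) s
    = pvGlue s (PySem.Str.join "," ((keys.filter cond).map tagf)) := by
  induction keys with
  | nil => intro s; simp [pvJoin_nil, pvGlue]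
  | cons k keys ih =>
    intro s
    have hk : tagf k ≠ "" := h k (by simp)
    have h' : ∀ i ∈ keys, tagf i ≠ "" := fun i hi => h i (by simp [hi])
    by_cases hc : cond k
    · simp only [List.foldl_cons, hc, if_true, List.filter_cons_of_pos hc, List.map_cons]
      rw [ih h']
      have hs' : (if s ≠ "" then s ++ "," else s) ++ tagf k = pvGlue s (tagf k) := by
        by_cases hs : s = "" <;> simp [pvGlue, hs, hk]
      rw [hs', pvGlue_assoc,
          pvJoin_cons (tagf k) ((keys.filter cond).map tagf) hk (by
            intro p hp
            rcases List.mem_map.mp hp with ⟨i, hi, rfl⟩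
            exact h' i (List.mem_of_mem_filter hi))]
    · have hc' : cond k = false := by simpa using hc
      simp only [List.foldl_cons, hc', Bool.false_eq_true, if_false,
        List.filter_cons_of_neg (by simp [hc'] : ¬ cond k = true)]
      exact ih h' s

-- lookups beyond index 4 of tests are false under Pre_
theorem pvGetD_ge5 (t0 t1 t2 t3 t4 : Bool) (rest : List Bool)
    (hrest : ∀ b ∈ rest, b = false) (j : Int) (hj : 5 ≤ j) :
    PySem.List.pyGetD (t0::t1::t2::t3::t4::rest) j false = false := by
  rw [PySem.List.pyGetD_of_nonneg _ _ (by omega)]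
  have h5 : 5 ≤ j.toNat := by omega
  generalize hk : j.toNat = k at h5
  obtain ⟨m, rfl⟩ : ∃ m, k = m + 5 := ⟨k - 5, by omega⟩
  simp only [List.getD_cons_succ]
  cases hr : rest[m]? with
  | none => simp [List.getD_eq_getElem?_getD, hr]
  | some b =>
    have : b ∈ rest := List.mem_of_getElem? hr
    simp [List.getD_eq_getElem?_getD, hr, hrest b this]

-- a filtered range collapses to its first five indices when the predicate is false from 5 on
theorem pvFiltShrink (p : Int → Bool) (hp : ∀ j : Int, 5 ≤ j → p j = false) :
    ∀ n : Nat, 5 ≤ n →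
    (PySem.List.pyRange 0 (n : Int)).filter p = (PySem.List.pyRange 0 (5 : Int)).filter p := by
  intro n
  induction n with
  | zero => omega
  | succ n ih =>
    intro h5
    by_cases h1 : 5 ≤ n
    · have : ((n + 1 : Nat) : Int) = (n : Int) + 1 := by push_cast; ring
      rw [this, PySem.List.pyRange_one_succ_right (by omega), List.filter_append]
      simp [hp (n : Int) (by exact_mod_cast h1)]
      exact ih h1
    · have : n + 1 = 5 := by omega
      rw [this]; norm_num

-- the running maximum over W/OK severities
theorem pvFoldMax (ws : List String) (h : ∀ w ∈ ws, w = "W" ∨ w = "OK") :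
    ∀ a : Int, 0 ≤ a →
    ws.foldl (fun w s => max w (pvRank.getD s 0)) a = max a (if ws.contains "W" then 1 else 0) := by
  induction ws with
  | nil => intro a ha; simp; omega
  | cons w ws ih =>
    intro a ha
    have h' : ∀ x ∈ ws, x = "W" ∨ x = "OK" := fun x hx => h x (by simp [hx])
    have rW : pvRank.getD "W" 0 = 1 := by decide
    have rOK : pvRank.getD "OK" 0 = 0 := by decide
    rcases h w (by simp) with rfl | rfl <;>
      simp only [List.foldl_cons, rW, rOK] <;>
      rw [ih h' _ (le_max_of_le_left ha)] <;>
      by_cases hw : ws.contains "W" <;> simp [hw, List.contains_cons] <;> omega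

theorem pvRank_getD (f1 : String) :
    pvRank.getD f1 0 = if f1 = "E" then 2 else if f1 = "W" then 1 else 0 := by
  by_cases hE : f1 = "E"
  · rw [if_pos hE]; subst hE; decide
  · by_cases hW : f1 = "W"
    · rw [if_neg hE, if_pos hW]; subst hW; decide
    · by_cases hOK : f1 = "OK"
      · rw [if_neg hE, if_neg hW]; subst hOK; decide
      · have e1 : (("OK":String) == f1) = false := by simp [Ne.symm hOK]
        have e2 : (("W":String) == f1) = false := by simp [Ne.symm hW]
        have e3 : (("E":String) == f1) = false := by simp [Ne.symm hE]
        simp [hE, hW, pvRank, PySem.Dict.getD, PySem.Dict.get?, PySem.Dict.ofList,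
          PySem.Dict.empty, PySem.Dict.update, PySem.Dict.insert, List.find?, e1, e2, e3]

-- A's two membership scans agree with B's severity maximum
theorem pvFlagCore (ws : List String) (h : ∀ w ∈ ws, w = "W" ∨ w = "OK") (f1 : String) :
    (if (ws ++ [f1]).contains "E" then "E"
     else if (ws ++ [f1]).contains "W" then "W" else "OK")
    = PySem.List.pyGetD pvLevels (ws.foldl (fun w s => max w (pvRank.getD s 0)) (pvRank.getD f1 0)) "" := by
  have hEmem : "E" ∉ ws := by intro hm; rcases h _ hm with h' | h' <;> simp_all
  have ha : 0 ≤ pvRank.getD f1 0 := by rw [pvRank_getD]; split_ifs <;> omega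
  rw [pvFoldMax ws h _ ha, pvRank_getD]
  by_cases hfE : f1 = "E" <;> by_cases hfW : f1 = "W" <;> by_cases hw : "W" ∈ ws <;>
    simp [hfE, hfW, hw, hEmem, eq_comm, pvLevels, PySem.List.pyGetD_ofNat']

-- ===== VERDICT (by name: the statement is the Claim_ definition above) =====
theorem readTests_spec : Claim_equal_readTests := by
  intro tests tags flag _hdom hpre
  obtain ⟨h5, hdrop, htags⟩ := hpre
  unfold Spec_readTests
  rcases tests with _|⟨t0,tests⟩; · norm_num at h5
  rcases tests with _|⟨t1,tests⟩; · norm_num at h5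
  rcases tests with _|⟨t2,tests⟩; · norm_num at h5
  rcases tests with _|⟨t3,tests⟩; · norm_num at h5
  rcases tests with _|⟨t4,rest⟩; · norm_num at h5
  have hrest : ∀ b ∈ rest, b = false := by
    simp only [List.drop_succ_cons, List.drop_zero, List.all_eq_true, beq_iff_eq] at hdrop
    exact hdrop
  have hkeys1 : dictests.keys = [0,1,2,3,4] := by decide
  have hkeys2 : dictags.keys = [0,1,2,3,4,5] := by decide
  have hr5 : PySem.List.pyRange 0 5 = [0,1,2,3,4] := by decide
  have hr6 : PySem.List.pyRange 0 6 = [0,1,2,3,4,5] := by decide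
  have hfalse : ∀ j : Int, 5 ≤ j →
      PySem.List.pyGetD (t0::t1::t2::t3::t4::rest) j false = false :=
    pvGetD_ge5 t0 t1 t2 t3 t4 rest hrest
  rcases tags with _|tg
  · simp only [readTests, readTests_alt, Prod.mk.injEq]
    constructor
    · rw [hkeys1, pvCommaFold _ _ _ (by decide), pvGlue_empty_left, hr5, List.append_nil]
      have hm1 : ((([0,1,2,3,4] : List Int).filter
            (fun i => PySem.List.pyGetD (t0::t1::t2::t3::t4::rest) i false)).map
            (fun i => PySem.List.pyGetD (dictests.getD i []) 1 ""))
          = ((([0,1,2,3,4] : List Int).filter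
            (fun i => PySem.List.pyGetD (t0::t1::t2::t3::t4::rest) i false)).map
            (fun i => PySem.List.pyGetD pvTestTags i "")) := by
        apply List.map_congr_left
        intro i hi
        have hi' := List.mem_of_mem_filter hi
        fin_cases hi' <;> decide
      rw [hm1]
    · have hlen : (t0::t1::t2::t3::t4::rest).length = rest.length + 5 := by simp
      rw [hlen, ← List.foldl_filter, pvFiltShrink _ hfalse (rest.length + 5) (by omega)]
      rw [← List.foldl_map (f := fun j : Int => PySem.List.pyGetD pvTestFlags j "OK")
            (g := fun w s => max w (pvRank.getD s 0))]
      have hm3 : (((PySem.List.pyRange 0 5).filter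
            (fun j => PySem.List.pyGetD (t0::t1::t2::t3::t4::rest) j false)).map
            (fun j : Int => PySem.List.pyGetD pvTestFlags j "OK"))
          = (((PySem.List.pyRange 0 5).filter
            (fun j => PySem.List.pyGetD (t0::t1::t2::t3::t4::rest) j false)).map
            (fun j : Int => PySem.List.pyGetD (dictests.getD j []) 2 "")) := by
        apply List.map_congr_left
        intro i hi
        have hi' := List.mem_of_mem_filter hi
        rw [hr5] at hi'
        fin_cases hi' <;> decide
      rw [hm3]
      refine pvFlagCore _ ?_ _
      intro w hw
      rcases List.mem_map.mp hw with ⟨i, hi, rfl⟩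
      have hi' := List.mem_of_mem_filter hi
      rw [hr5] at hi'
      fin_cases hi' <;> decide
  · have htg : 6 ≤ tg.length := by simpa using htags
    rcases tg with _|⟨g0,tg⟩; · norm_num at htg
    rcases tg with _|⟨g1,tg⟩; · norm_num at htg
    rcases tg with _|⟨g2,tg⟩; · norm_num at htg
    rcases tg with _|⟨g3,tg⟩; · norm_num at htg
    rcases tg with _|⟨g4,tg⟩; · norm_num at htg
    rcases tg with _|⟨g5,rest2⟩; · norm_num at htg
    simp only [readTests, readTests_alt, Prod.mk.injEq]
    constructor
    · rw [hkeys1, hkeys2,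
          pvCommaFold (fun i => PySem.List.pyGetD (g0::g1::g2::g3::g4::g5::rest2) i false)
            _ _ (by decide),
          pvCommaFold (fun i => PySem.List.pyGetD (t0::t1::t2::t3::t4::rest) i false)
            _ _ (by decide),
          pvGlue_empty_left, hr5, hr6]
      rw [pvJoin_append _ _ (by
            intro p hp
            rcases List.mem_map.mp hp with ⟨i, hi, rfl⟩
            have hi' := List.mem_of_mem_filter hi
            fin_cases hi' <;> decide)
          (by
            intro p hp
            rcases List.mem_map.mp hp with ⟨i, hi, rfl⟩
            have hi' := List.mem_of_mem_filter hi
            fin_cases hi' <;> decide)]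
      have hm1 : ((([0,1,2,3,4] : List Int).filter
            (fun i => PySem.List.pyGetD (t0::t1::t2::t3::t4::rest) i false)).map
            (fun i => PySem.List.pyGetD (dictests.getD i []) 1 ""))
          = ((([0,1,2,3,4] : List Int).filter
            (fun i => PySem.List.pyGetD (t0::t1::t2::t3::t4::rest) i false)).map
            (fun i => PySem.List.pyGetD pvTestTags i "")) := by
        apply List.map_congr_left
        intro i hi
        have hi' := List.mem_of_mem_filter hi
        fin_cases hi' <;> decide
      have hm2 : ((([0,1,2,3,4,5] : List Int).filter
            (fun i => PySem.List.pyGetD (g0::g1::g2::g3::g4::g5::rest2) i false)).map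
            (fun i => PySem.List.pyGetD (dictags.getD i []) 1 ""))
          = ((([0,1,2,3,4,5] : List Int).filter
            (fun i => PySem.List.pyGetD (g0::g1::g2::g3::g4::g5::rest2) i false)).map
            (fun i => PySem.List.pyGetD pvTagTags i "")) := by
        apply List.map_congr_left
        intro i hi
        have hi' := List.mem_of_mem_filter hi
        fin_cases hi' <;> decide
      rw [hm1, hm2]
    · have hlen : (t0::t1::t2::t3::t4::rest).length = rest.length + 5 := by simp
      rw [hlen, ← List.foldl_filter, pvFiltShrink _ hfalse (rest.length + 5) (by omega)]
      rw [← List.foldl_map (f := fun j : Int => PySem.List.pyGetD pvTestFlags j "OK")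
            (g := fun w s => max w (pvRank.getD s 0))]
      have hm3 : (((PySem.List.pyRange 0 5).filter
            (fun j => PySem.List.pyGetD (t0::t1::t2::t3::t4::rest) j false)).map
            (fun j : Int => PySem.List.pyGetD pvTestFlags j "OK"))
          = (((PySem.List.pyRange 0 5).filter
            (fun j => PySem.List.pyGetD (t0::t1::t2::t3::t4::rest) j false)).map
            (fun j : Int => PySem.List.pyGetD (dictests.getD j []) 2 "")) := by
        apply List.map_congr_left
        intro i hi
        have hi' := List.mem_of_mem_filter hi
        rw [hr5] at hi'
        fin_cases hi' <;> decide
      rw [hm3]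
      refine pvFlagCore _ ?_ _
      intro w hw
      rcases List.mem_map.mp hw with ⟨i, hi, rfl⟩
      have hi' := List.mem_of_mem_filter hi
      rw [hr5] at hi'
      fin_cases hi' <;> decide
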